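-- pv_equiv track=rewrite | github.com/tykim9999/qmd | finetune/dataset/schema.py | normalize_output_items
-- ===== SOURCE A (Python) =====
-- from typing import Iterable
--
-- VALID_OUTPUT_TYPES = {"hyde", "lex", "vec"}
--
-- def reorder_hyde_first(items: list[list[str]]) -> list[list[str]]:
--     """Reorder items to put hyde first, then lex, then vec."""
--     hyde_items = [item for item in items if item and item[0] == "hyde"]
--     lex_items = [item for item in items if item and item[0] == "lex"]
--     vec_items = [item for item in items if item and item[0] == "vec"]
--     return hyde_items + lex_items + vec_items
--
-- def normalize_output_items(items: Iterable[Iterable[str]], hyde_first: bool = True) -> list[list[str]]: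
--     """Normalize output list pairs (filter invalid, trim whitespace, reorder).
--
--     Args:
--         items: Iterable of [type, text] pairs
--         hyde_first: If True, reorder to put hyde first (default)
--     """
--     normalized: list[list[str]] = []
--     for item in items:
--         if not item:
--             continue
--         try:
--             kind, text = item[0], item[1]
--         except Exception:
--             continue
--         if kind not in VALID_OUTPUT_TYPES:
--             continue
--         if text is None:
--             continue
--         text = str(text).strip()
--         if not text:
--             continue
--         normalized.append([kind, text])
--
--     # Apply hyde-first ordering if requested
--     if hyde_first:
--         normalized = reorder_hyde_first(normalized)
--
--     return normalized
-- ===== SOURCE B (Python) =====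
-- def normalize_output_items(items, hyde_first=True):
--     priority = {"hyde": 0, "lex": 1, "vec": 2}
--     normalized = [
--         [it[0], t]
--         for it in items
--         if len(it) >= 2 and it[0] in priority and (t := str(it[1]).strip())
--     ]
--     if hyde_first:
--         normalized.sort(key=lambda it: priority[it[0]])
--     return normalized
-- ===== Notes on version B (the rewrite author's own statement) =====
-- stated objective: idiomatic
-- what changed: The filter/trim loop becomes a single comprehension, and the three-pass partition-and-concatenate reorder is replaced by one stable sort on a priority key (stability preserves within-type order).
import Mathlib
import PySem

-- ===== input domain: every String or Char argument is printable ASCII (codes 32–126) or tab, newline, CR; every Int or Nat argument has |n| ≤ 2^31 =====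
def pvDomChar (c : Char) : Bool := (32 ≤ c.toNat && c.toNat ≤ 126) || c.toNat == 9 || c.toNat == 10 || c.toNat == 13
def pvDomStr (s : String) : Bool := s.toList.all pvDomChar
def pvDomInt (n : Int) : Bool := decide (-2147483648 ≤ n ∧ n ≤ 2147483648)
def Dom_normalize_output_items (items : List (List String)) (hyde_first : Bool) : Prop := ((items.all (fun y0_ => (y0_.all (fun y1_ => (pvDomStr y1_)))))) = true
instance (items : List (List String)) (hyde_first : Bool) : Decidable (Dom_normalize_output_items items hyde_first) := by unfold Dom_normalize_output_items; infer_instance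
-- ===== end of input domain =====

-- B replaces A's filter/trim loop by a single comprehension and A's three-pass
-- partition-and-concatenate reorder by one stable sort on a priority key (objective: idiomatic).

-- ===== PORT A =====
def pvValidOutputTypes : PySem.Set String := PySem.Set.ofList ["hyde", "lex", "vec"]

def reorder_hyde_first (items : List (List String)) : List (List String) :=
  let hyde_items := items.filter (fun item => match item with | [] => false | k :: _ => k == "hyde")
  let lex_items := items.filter (fun item => match item with | [] => false | k :: _ => k == "lex")
  let vec_items := items.filter (fun item => match item with | [] => false | k :: _ => k == "vec")
  hyde_items ++ lex_items ++ vec_items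

def normalize_output_items (items : List (List String)) (hyde_first : Bool) : List (List String) :=
  let normalized := items.foldl (fun acc item =>
    match item with
    | [] => acc                 -- 'if not item: continue'
    | [_] => acc                -- item[1] raises IndexError, caught by the except: continue
    | kind :: text :: _ =>      -- kind, text = item[0], item[1]
      if !(pvValidOutputTypes.contains kind) then acc   -- 'if kind not in VALID_OUTPUT_TYPES: continue'
      else                      -- 'if text is None: continue' never fires: text is a str here
        let text := PySem.Str.strip text                -- text = str(text).strip()
        if text == "" then acc                          -- 'if not text: continue'
        else acc ++ [[kind, text]]) []
  if hyde_first then reorder_hyde_first normalized else normalized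

-- ===== PORT B =====
def pvPriority : PySem.Dict String Int := PySem.Dict.ofList [("hyde", 0), ("lex", 1), ("vec", 2)]

def normalize_output_items_alt (items : List (List String)) (hyde_first : Bool) : List (List String) :=
  let normalized := items.filterMap (fun it =>
    match it with
    | k :: txt :: _ =>                       -- 'len(it) >= 2'
      if pvPriority.contains k then          -- 'it[0] in priority'
        let t := PySem.Str.strip txt         -- 't := str(it[1]).strip()'
        if t == "" then none else some [k, t]
      else none
    | _ => none)
  if hyde_first then
    -- 'normalized.sort(key=lambda it: priority[it[0]])' — a stable sort; every it in normalized
    -- is [k, t] with k a key of priority, so the Python key lookup never raises and equals this getD.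
    PySem.List.sorted normalized (fun it => pvPriority.getD (it.headD "") 0) false
  else normalized

-- ===== PRECONDITION & SPEC =====
def Spec_normalize_output_items (items : List (List String)) (hyde_first : Bool) (out : List (List String)) : Prop := out = normalize_output_items_alt items hyde_first
instance (items : List (List String)) (hyde_first : Bool) (out : List (List String)) : Decidable (Spec_normalize_output_items items hyde_first out) := by unfold Spec_normalize_output_items; infer_instance

-- ===== CLAIM (what is proved, stated in full; the proofs are below) =====
def Claim_equal_normalize_output_items : Prop := ∀ (items : List (List String)) (hyde_first : Bool), Dom_normalize_output_items items hyde_first → Spec_normalize_output_items items hyde_first (normalize_output_items items hyde_first)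

-- ===== LEMMAS AND PROOFS =====

-- the element-wise function of B's comprehension
def pvB (it : List String) : Option (List String) :=
  match it with
  | k :: txt :: _ =>
    if pvPriority.contains k then
      let t := PySem.Str.strip txt
      if t == "" then none else some [k, t]
    else none
  | _ => none

theorem hpv : pvPriority = PySem.Dict.mk [("hyde", 0), ("lex", 1), ("vec", 2)] := by decide

theorem contains_valid_eq (k : String) :
    pvValidOutputTypes.contains k = pvPriority.contains k := by
  simp only [pvValidOutputTypes, PySem.Set.ofList, hpv, PySem.Dict.contains]
  by_cases h1 : k = "hyde"
  · subst h1; decide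
  · by_cases h2 : k = "lex"
    · subst h2; decide
    · by_cases h3 : k = "vec"
      · subst h3; decide
      · simp [h1, h2, h3, Ne.symm h1, Ne.symm h2, Ne.symm h3]

theorem mem_valid_iff (k : String) : (k ∈ pvValidOutputTypes) ↔ pvPriority.contains k = true := by
  rw [← contains_valid_eq]
  simp

-- A's accumulation loop computes B's filterMap
theorem loopA_eq (items : List (List String)) (acc : List (List String)) :
    items.foldl (fun acc item =>
      match item with
      | [] => acc
      | [_] => acc
      | kind :: text :: _ =>
        if !(pvValidOutputTypes.contains kind) then acc
        else
          let text := PySem.Str.strip text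
          if text == "" then acc
          else acc ++ [[kind, text]]) acc
    = acc ++ items.filterMap pvB := by
  induction items generalizing acc with
  | nil => simp
  | cons it rest ih =>
    match it with
    | [] => simpa [pvB] using ih acc
    | [k] => simpa [pvB] using ih acc
    | k :: txt :: r =>
      rw [List.foldl_cons, ih]
      simp only [List.filterMap_cons, pvB]
      by_cases hk : pvPriority.contains k
      · by_cases ht : PySem.Str.strip txt == ""
        · simp [mem_valid_iff, hk, ht]
        · simp [mem_valid_iff, hk, ht, List.append_assoc]
      · simp [mem_valid_iff, hk]

-- every element produced by the comprehension is [k, t] with k one of the three types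
theorem shape_filterMap (items : List (List String)) (x : List String)
    (hx : x ∈ items.filterMap pvB) :
    ∃ k t, x = [k, t] ∧ (k = "hyde" ∨ k = "lex" ∨ k = "vec") := by
  rcases List.mem_filterMap.mp hx with ⟨it, _, hit⟩
  match it, hit with
  | k :: txt :: _, hit =>
    simp only [pvB] at hit
    by_cases hk : pvPriority.contains k
    · rw [if_pos hk] at hit
      by_cases ht : PySem.Str.strip txt == ""
      · simp [ht] at hit
      · simp only [ht, Bool.false_eq_true, if_false, Option.some.injEq] at hit
        refine ⟨k, PySem.Str.strip txt, hit.symm, ?_⟩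
        rw [hpv] at hk
        simp only [PySem.Dict.contains, List.any_cons, List.any_nil, Bool.or_false,
          Bool.or_eq_true, beq_iff_eq] at hk
        rcases hk with h | h | h
        · exact Or.inl h.symm
        · exact Or.inr (Or.inl h.symm)
        · exact Or.inr (Or.inr h.symm)
    · rw [if_neg hk] at hit; exact absurd hit (by simp)

-- inserting x into u ++ v places it exactly between u and v
theorem insertBy_partition {α : Type} (before : α → α → Bool) (x : α) (u v : List α)
    (hu : ∀ y ∈ u, before x y = false) (hv : ∀ y ∈ v, before x y = true) :
    PySem.List.insertBy before x (u ++ v) = u ++ x :: v := by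
  induction u with
  | nil =>
    cases v with
    | nil => rfl
    | cons y ys => simp [PySem.List.insertBy, hv y (List.mem_cons_self)]
  | cons a u ih =>
    have ha := hu a (List.mem_cons_self)
    simp only [List.cons_append, PySem.List.insertBy, ha]
    simp only [Bool.false_eq_true, if_false, List.cons.injEq, true_and]
    exact ih (fun y hy => hu y (List.mem_cons_of_mem _ hy))

-- stable insertion sort on a 3-valued key is the three-bucket concatenation
theorem sorted_three {α : Type} (key : α → Int) (xs : List α)
    (h : ∀ x ∈ xs, key x = 0 ∨ key x = 1 ∨ key x = 2) :
    PySem.List.sorted xs key false =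
      xs.filter (fun x => key x == 0) ++ xs.filter (fun x => key x == 1)
        ++ xs.filter (fun x => key x == 2) := by
  induction xs using List.reverseRecOn with
  | nil => rfl
  | append_singleton xs x ih =>
    have hx := h x (by simp)
    have hxs : ∀ y ∈ xs, key y = 0 ∨ key y = 1 ∨ key y = 2 := fun y hy => h y (by simp [hy])
    have ih' := ih hxs
    rw [PySem.List.sorted_eq_foldl_insertBy] at ih' ⊢
    rw [List.foldl_append, List.foldl_cons, List.foldl_nil, ih']
    have h0mem : ∀ y ∈ xs.filter (fun y => key y == 0), key y = 0 := by
      intro y hy; simpa using (List.mem_filter.mp hy).2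
    have h1mem : ∀ y ∈ xs.filter (fun y => key y == 1), key y = 1 := by
      intro y hy; simpa using (List.mem_filter.mp hy).2
    have h2mem : ∀ y ∈ xs.filter (fun y => key y == 2), key y = 2 := by
      intro y hy; simpa using (List.mem_filter.mp hy).2
    rcases hx with h0 | h1 | h2
    · rw [List.append_assoc, insertBy_partition _ x (xs.filter (fun y => key y == 0))
        (xs.filter (fun y => key y == 1) ++ xs.filter (fun y => key y == 2))
        (by intro y hy; simp [h0, h0mem y hy])
        (by intro y hy; rcases List.mem_append.mp hy with hy | hy
            · simp [h0, h1mem y hy]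
            · simp [h0, h2mem y hy])]
      simp [List.filter_append, h0, List.append_assoc]
    · rw [insertBy_partition _ x (xs.filter (fun y => key y == 0) ++ xs.filter (fun y => key y == 1))
        (xs.filter (fun y => key y == 2))
        (by intro y hy; rcases List.mem_append.mp hy with hy | hy
            · simp [h1, h0mem y hy]
            · simp [h1, h1mem y hy])
        (by intro y hy; simp [h1, h2mem y hy])]
      simp [List.filter_append, h1, List.append_assoc]
    · have hall := insertBy_partition (fun a b => decide (key a < key b)) x
        (xs.filter (fun y => key y == 0) ++ xs.filter (fun y => key y == 1)
          ++ xs.filter (fun y => key y == 2)) []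
        (by intro y hy
            rcases List.mem_append.mp hy with hy | hy
            · rcases List.mem_append.mp hy with hy | hy
              · simp [h2, h0mem y hy]
              · simp [h2, h1mem y hy]
            · simp [h2, h2mem y hy])
        (by simp)
      rw [List.append_nil] at hall
      rw [hall]
      simp [List.filter_append, h2, List.append_assoc]

-- on lists of [k, t] pairs with valid k, A's partition-reorder is B's stable sort
theorem reorder_eq_sorted (ys : List (List String))
    (h : ∀ x ∈ ys, ∃ k t, x = [k, t] ∧ (k = "hyde" ∨ k = "lex" ∨ k = "vec")) :
    reorder_hyde_first ys =
      PySem.List.sorted ys (fun it => pvPriority.getD (it.headD "") 0) false := by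
  have hkeys : ∀ x ∈ ys, pvPriority.getD (x.headD "") 0 = 0 ∨
      pvPriority.getD (x.headD "") 0 = 1 ∨ pvPriority.getD (x.headD "") 0 = 2 := by
    intro x hx
    rcases h x hx with ⟨k, t, rfl, hk | hk | hk⟩ <;> subst hk
    · exact Or.inl rfl
    · exact Or.inr (Or.inl rfl)
    · exact Or.inr (Or.inr rfl)
  rw [sorted_three _ ys hkeys]
  have e0 : ys.filter (fun item => match item with | [] => false | k :: _ => k == "hyde")
      = ys.filter (fun x => pvPriority.getD (x.headD "") 0 == 0) :=
    List.filter_congr (fun x hx => by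
      rcases h x hx with ⟨k, t, rfl, hk | hk | hk⟩ <;> subst hk <;> rfl)
  have e1 : ys.filter (fun item => match item with | [] => false | k :: _ => k == "lex")
      = ys.filter (fun x => pvPriority.getD (x.headD "") 0 == 1) :=
    List.filter_congr (fun x hx => by
      rcases h x hx with ⟨k, t, rfl, hk | hk | hk⟩ <;> subst hk <;> rfl)
  have e2 : ys.filter (fun item => match item with | [] => false | k :: _ => k == "vec")
      = ys.filter (fun x => pvPriority.getD (x.headD "") 0 == 2) :=
    List.filter_congr (fun x hx => by
      rcases h x hx with ⟨k, t, rfl, hk | hk | hk⟩ <;> subst hk <;> rfl)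
  have hre : reorder_hyde_first ys =
      ys.filter (fun item => match item with | [] => false | k :: _ => k == "hyde")
        ++ ys.filter (fun item => match item with | [] => false | k :: _ => k == "lex")
        ++ ys.filter (fun item => match item with | [] => false | k :: _ => k == "vec") := rfl
  rw [hre, e0, e1, e2]

-- ===== VERDICT (by name: the statement is the Claim_ definition above) =====
theorem normalize_output_items_spec : Claim_equal_normalize_output_items := by
  intro items hyde_first _
  unfold Spec_normalize_output_items normalize_output_items normalize_output_items_alt
  rw [loopA_eq]
  simp only [List.nil_append]
  have hB : (items.filterMap (fun it =>
      match it with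
      | k :: txt :: _ =>
        if pvPriority.contains k then
          let t := PySem.Str.strip txt
          if t == "" then none else some [k, t]
        else none
      | _ => none)) = items.filterMap pvB := rfl
  rw [hB]
  cases hyde_first with
  | false => rfl
  | true => exact reorder_eq_sorted _ (shape_filterMap items)
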